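-- pv_equiv track=rewrite | github.com/qingfengxia/python-projecteuler | poker_game/TexasHoldemPoker.py | resortpair
-- ===== SOURCE A (Python) =====
-- iFace=1  #index of Face in card tuple
--
-- def resortpair(h):
--     lf=[c[iFace] for c in h]
--     sf=set(lf)
--     # key=lambda k:k[1] is not needed, it should work for tuples, if count is equal, compared the second element of tuples!
--     fc=sorted([(lf.count(f), f) for f in sf])  #reverse=True
--     #TWOPAIRS is tricky to deal with
--     sh=[]
--     for f in fc:
--         sh+=[c for c in h if c[iFace]==f[1]]  #find item in h, then append,
--     return sh
-- ===== SOURCE B (Python) =====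
-- iFace = 1  # index of Face in card tuple
--
-- def resortpair(h):
--     cnt = {}
--     for c in h:
--         cnt[c[iFace]] = cnt.get(c[iFace], 0) + 1
--     return sorted(h, key=lambda c: (cnt[c[iFace]], c[iFace]))
-- ===== Notes on version B (the rewrite author's own statement) =====
-- stated objective: faster
-- what changed: A sorts the distinct (count, face) pairs and then rescans the whole hand once per distinct face to concatenate the groups; B builds one count dict in a single pass and does one stable sort of the hand keyed by (count, face), relying on sort stability for the within-group order.
import Mathlib
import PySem

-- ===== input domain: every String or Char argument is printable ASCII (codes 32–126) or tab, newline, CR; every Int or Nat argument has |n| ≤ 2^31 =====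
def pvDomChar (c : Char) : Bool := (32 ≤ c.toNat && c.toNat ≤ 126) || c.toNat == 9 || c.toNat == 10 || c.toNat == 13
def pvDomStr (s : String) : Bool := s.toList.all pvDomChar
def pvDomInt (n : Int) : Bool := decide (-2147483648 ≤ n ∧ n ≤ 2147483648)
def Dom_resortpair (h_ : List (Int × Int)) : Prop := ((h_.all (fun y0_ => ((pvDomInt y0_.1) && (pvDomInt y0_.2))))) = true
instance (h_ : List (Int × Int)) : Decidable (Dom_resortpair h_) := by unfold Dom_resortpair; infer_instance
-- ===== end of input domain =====

-- B replaces A's sort-distinct-faces-then-rescan-the-hand decomposition by one counting pass and a single stable keyed sort (objective: simpler).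

-- ===== PORT A =====
def resortpair (h_ : List (Int × Int)) : List (Int × Int) :=
  let lf : List Int := h_.map (fun c => c.2)
  let sf : PySem.Set Int := PySem.Set.ofList lf
  -- sorted([(lf.count(f), f) for f in sf]): identity key on tuples = lexicographic (count, face)
  let fc : List (Int × Int) :=
    PySem.List.sorted2 (sf.map (fun f => ((PySem.List.count lf f : Int), f))) (fun p => p.1) (fun p => p.2) false
  fc.foldl (fun sh f => sh ++ h_.filter (fun c => c.2 == f.2)) []

-- ===== PORT B =====
def resortpair_alt (h_ : List (Int × Int)) : List (Int × Int) :=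
  let cnt : PySem.Dict Int Int := h_.foldl (fun d c => d.modify c.2 0 (· + 1)) PySem.Dict.empty
  PySem.List.sorted2 h_ (fun c => cnt.getD c.2 0) (fun c => c.2) false

-- ===== PRECONDITION & SPEC =====
def Spec_resortpair (h_ : List (Int × Int)) (out : List (Int × Int)) : Prop := out = resortpair_alt h_
instance (h_ : List (Int × Int)) (out : List (Int × Int)) : Decidable (Spec_resortpair h_ out) := by unfold Spec_resortpair; infer_instance

-- ===== CLAIM (what is proved, stated in full; the proofs are below) =====
def Claim_equal_resortpair : Prop := ∀ (h_ : List (Int × Int)), Dom_resortpair h_ → Spec_resortpair h_ (resortpair h_)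

-- ===== LEMMAS AND PROOFS =====

-- The boolean strict lexicographic order on (Int × Int) that sorted2's insertion sort uses.
def pvLtb (a b : Int × Int) : Bool := decide (a.1 < b.1) || (!decide (b.1 < a.1) && decide (a.2 < b.2))

theorem pvLtb_irrefl (a : Int × Int) : pvLtb a a = false := by simp [pvLtb]

theorem pvLtb_asymm {a b : Int × Int} (h : pvLtb a b = true) : pvLtb b a = false := by
  simp [pvLtb] at *; omega

theorem pvLtb_total {a b : Int × Int} (hne : a ≠ b) (h : pvLtb a b = false) : pvLtb b a = true := by
  have : a.1 ≠ b.1 ∨ a.2 ≠ b.2 := by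
    rcases eq_or_ne a.1 b.1 with h1 | h1
    · rcases eq_or_ne a.2 b.2 with h2 | h2
      · exact absurd (Prod.ext h1 h2) hne
      · exact Or.inr h2
    · exact Or.inl h1
  simp [pvLtb] at *; omega

theorem pvLtb_trans_neg {x y w : Int × Int} (h1 : pvLtb x y = true) (h2 : pvLtb w y = false) :
    pvLtb w x = false := by
  simp [pvLtb] at *; omega

theorem sorted2_eq_foldl {α : Type} (xs : List α) (k1 k2 : α → Int) :
    PySem.List.sorted2 xs k1 k2 false =
      xs.foldl (fun acc x => PySem.List.insertBy (fun a b => pvLtb (k1 a, k2 a) (k1 b, k2 b)) x acc) [] := rfl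

theorem insertBy_append_of_not {α : Type} (bef : α → α → Bool) (x : α) (F S : List α)
    (hF : ∀ y ∈ F, bef x y = false) :
    PySem.List.insertBy bef x (F ++ S) = F ++ PySem.List.insertBy bef x S := by
  induction F with
  | nil => rfl
  | cons y F ih =>
    simp only [List.cons_append, PySem.List.insertBy, hF y (by simp)]
    simp [ih (fun z hz => hF z (by simp [hz]))]

theorem insertBy_of_all {α : Type} (bef : α → α → Bool) (x : α) (S : List α)
    (hS : ∀ y ∈ S, bef x y = true) :
    PySem.List.insertBy bef x S = x :: S := by
  cases S with
  | nil => rfl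
  | cons y S => simp [PySem.List.insertBy, hS y (by simp)]

theorem insertBy_pairwise {α : Type} (bef : α → α → Bool)
    (htr : ∀ x y w, bef x y = true → bef w y = false → bef w x = false)
    (hirr : ∀ a, bef a a = false)
    (x : α) (l : List α) (hl : l.Pairwise (fun a b => bef b a = false)) :
    (PySem.List.insertBy bef x l).Pairwise (fun a b => bef b a = false) := by
  induction l with
  | nil => simp [PySem.List.insertBy]
  | cons y ys ih =>
    rcases List.pairwise_cons.mp hl with ⟨hy, hys⟩
    by_cases hxy : bef x y = true
    · simp only [PySem.List.insertBy, hxy, if_true]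
      refine List.pairwise_cons.mpr ⟨?_, hl⟩
      intro b hb
      rcases List.mem_cons.mp hb with rfl | hb
      · exact htr x b b hxy (hirr b)
      · exact htr x y b hxy (hy b hb)
    · simp only [PySem.List.insertBy, hxy]
      refine List.pairwise_cons.mpr ⟨?_, ih hys⟩
      intro b hb
      rcases (PySem.List.mem_insertBy bef x b ys).mp hb with rfl | hb
      · exact Bool.eq_false_iff.mpr hxy
      · exact hy b hb

theorem foldl_insertBy_pairwise {α : Type} (bef : α → α → Bool)
    (htr : ∀ x y w, bef x y = true → bef w y = false → bef w x = false)
    (hirr : ∀ a, bef a a = false) :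
    ∀ (l acc : List α), acc.Pairwise (fun a b => bef b a = false) →
      (l.foldl (fun acc x => PySem.List.insertBy bef x acc) acc).Pairwise (fun a b => bef b a = false) := by
  intro l
  induction l with
  | nil => intro acc h; simpa using h
  | cons x t ih =>
    intro acc h
    exact ih _ (insertBy_pairwise bef htr hirr x acc h)

theorem sorted2_pairwise' {α : Type} (xs : List α) (k1 k2 : α → Int) :
    (PySem.List.sorted2 xs k1 k2 false).Pairwise
      (fun a b => pvLtb (k1 b, k2 b) (k1 a, k2 a) = false) := by
  rw [sorted2_eq_foldl]
  exact foldl_insertBy_pairwise (fun a b => pvLtb (k1 a, k2 a) (k1 b, k2 b))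
    (fun x y w h1 h2 => pvLtb_trans_neg h1 h2)
    (fun a => pvLtb_irrefl _) xs [] (by simp)

theorem mem_sorted2 {α : Type} (xs : List α) (k1 k2 : α → Int) (y : α) :
    y ∈ PySem.List.sorted2 xs k1 k2 false ↔ y ∈ xs :=
  (PySem.List.sorted2_perm xs k1 k2 false).mem_iff

-- splitting off the group of a minimal key
theorem sorted2_split {α : Type} [BEq α] (k1 k2 : α → Int) (v : Int × Int) (h : List α)
    (hmin : ∀ c ∈ h, pvLtb (k1 c, k2 c) v = false) :
    PySem.List.sorted2 h k1 k2 false =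
      h.filter (fun c => (k1 c, k2 c) == v) ++
        PySem.List.sorted2 (h.filter (fun c => !((k1 c, k2 c) == v))) k1 k2 false := by
  induction h using List.reverseRecOn with
  | nil => rfl
  | append_singleton h x ih =>
    have hminh : ∀ c ∈ h, pvLtb (k1 c, k2 c) v = false := fun c hc => hmin c (by simp [hc])
    have hx : pvLtb (k1 x, k2 x) v = false := hmin x (by simp)
    have hstep : PySem.List.sorted2 (h ++ [x]) k1 k2 false =
        PySem.List.insertBy (fun a b => pvLtb (k1 a, k2 a) (k1 b, k2 b)) x
          (PySem.List.sorted2 h k1 k2 false) := by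
      rw [sorted2_eq_foldl, sorted2_eq_foldl, List.foldl_append]; rfl
    rw [hstep, ih hminh]
    have hF : ∀ y ∈ h.filter (fun c => (k1 c, k2 c) == v),
        pvLtb (k1 x, k2 x) (k1 y, k2 y) = false := by
      intro y hy
      rcases List.mem_filter.mp hy with ⟨_, hyv⟩
      have : (k1 y, k2 y) = v := by simpa using hyv
      rw [this]; exact hx
    rw [insertBy_append_of_not _ _ _ _ hF]
    by_cases hKx : (k1 x, k2 x) = v
    · have hall : ∀ y ∈ PySem.List.sorted2 (h.filter (fun c => !((k1 c, k2 c) == v))) k1 k2 false,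
          pvLtb (k1 x, k2 x) (k1 y, k2 y) = true := by
        intro y hy
        rcases List.mem_filter.mp ((mem_sorted2 _ _ _ _).mp hy) with ⟨hyh, hyv⟩
        have hne : (k1 y, k2 y) ≠ v := by simpa using hyv
        have := pvLtb_total hne (hminh y hyh)
        rw [hKx]; exact this
      rw [insertBy_of_all _ _ _ hall]
      have h1 : (h ++ [x]).filter (fun c => (k1 c, k2 c) == v)
          = h.filter (fun c => (k1 c, k2 c) == v) ++ [x] := by
        simp [List.filter_append, hKx]
      have h2 : (h ++ [x]).filter (fun c => !((k1 c, k2 c) == v))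
          = h.filter (fun c => !((k1 c, k2 c) == v)) := by
        simp [List.filter_append, hKx]
      rw [h1, h2]; simp
    · have h1 : (h ++ [x]).filter (fun c => (k1 c, k2 c) == v)
          = h.filter (fun c => (k1 c, k2 c) == v) := by
        simp [List.filter_append, hKx]
      have h2 : (h ++ [x]).filter (fun c => !((k1 c, k2 c) == v))
          = h.filter (fun c => !((k1 c, k2 c) == v)) ++ [x] := by
        simp [List.filter_append, hKx]
      rw [h1, h2]
      have : PySem.List.sorted2 (h.filter (fun c => !((k1 c, k2 c) == v)) ++ [x]) k1 k2 false =
          PySem.List.insertBy (fun a b => pvLtb (k1 a, k2 a) (k1 b, k2 b)) x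
            (PySem.List.sorted2 (h.filter (fun c => !((k1 c, k2 c) == v))) k1 k2 false) := by
        rw [sorted2_eq_foldl, sorted2_eq_foldl, List.foldl_append]; rfl
      rw [this]

theorem flatMap_congr_mem {α β : Type} (l : List α) (f g : α → List β)
    (h : ∀ v ∈ l, f v = g v) : l.flatMap f = l.flatMap g := by
  induction l with
  | nil => rfl
  | cons x t ih =>
    simp only [List.flatMap_cons, h x (by simp), ih (fun v hv => h v (by simp [hv]))]

-- a stable keyed sort is the concatenation, over the strictly increasing list of its
-- distinct keys, of the in-order groups of equal-key elements
theorem sorted2_eq_groups {α : Type} [BEq α] (k1 k2 : α → Int) :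
    ∀ (S : List (Int × Int)) (h : List α),
      S.Pairwise (fun a b => pvLtb a b = true) →
      (∀ v : Int × Int, v ∈ S ↔ ∃ c ∈ h, (k1 c, k2 c) = v) →
      PySem.List.sorted2 h k1 k2 false =
        S.flatMap (fun v => h.filter (fun c => (k1 c, k2 c) == v)) := by
  intro S
  induction S with
  | nil =>
    intro h _ hmem
    cases h with
    | nil => rfl
    | cons c t =>
      exact absurd ((hmem (k1 c, k2 c)).mpr ⟨c, by simp, rfl⟩) (by simp)
  | cons v rest ih =>
    intro h hS hmem
    rcases List.pairwise_cons.mp hS with ⟨hv, hrest⟩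
    have hmin : ∀ c ∈ h, pvLtb (k1 c, k2 c) v = false := by
      intro c hc
      rcases List.mem_cons.mp ((hmem (k1 c, k2 c)).mpr ⟨c, hc, rfl⟩) with heq | hmem'
      · rw [heq]; exact pvLtb_irrefl v
      · exact pvLtb_asymm (hv _ hmem')
    rw [sorted2_split k1 k2 v h hmin, List.flatMap_cons]
    congr 1
    have hmem' : ∀ w : Int × Int, w ∈ rest ↔
        ∃ c ∈ h.filter (fun c => !((k1 c, k2 c) == v)), (k1 c, k2 c) = w := by
      intro w
      constructor
      · intro hw
        rcases (hmem w).mp (by simp [hw]) with ⟨c, hc, hKc⟩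
        have hwv : w ≠ v := by
          intro heq
          have := hv w hw
          rw [heq] at this
          simp [pvLtb_irrefl] at this
        refine ⟨c, List.mem_filter.mpr ⟨hc, by simp [hKc, hwv]⟩, hKc⟩
      · rintro ⟨c, hc, hKc⟩
        rcases List.mem_filter.mp hc with ⟨hch, hcv⟩
        have hne : (k1 c, k2 c) ≠ v := by simpa using hcv
        rcases List.mem_cons.mp ((hmem (k1 c, k2 c)).mpr ⟨c, hch, rfl⟩) with heq | hm
        · exact absurd heq hne
        · rw [← hKc]; exact hm
    rw [ih _ hrest hmem']
    apply flatMap_congr_mem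
    intro w hw
    have hwv : w ≠ v := by
      intro heq
      have := hv w hw
      rw [heq] at this
      simp [pvLtb_irrefl] at this
    rw [List.filter_filter]
    apply List.filter_congr
    intro c _
    by_cases hc : (k1 c, k2 c) = w
    · simp [hc, hwv]
    · simp [hc]

-- ===== VERDICT (by name: the statement is the Claim_ definition above) =====
theorem resortpair_spec : Claim_equal_resortpair := by
  intro h _
  unfold Spec_resortpair resortpair resortpair_alt
  set lf : List Int := h.map (fun c => c.2) with hlf
  -- B's hand-built dict is Counter(lf); its lookups are counts in lf
  have hcnt : h.foldl (fun d c => d.modify c.2 0 (· + 1)) PySem.Dict.empty = PySem.Dict.counter lf := by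
    rw [PySem.Dict.counter_eq_foldl, hlf, List.foldl_map]
  have hk1 : (fun c : Int × Int =>
      (h.foldl (fun d c => d.modify c.2 0 (· + 1)) PySem.Dict.empty).getD c.2 0)
      = fun c : Int × Int => ((PySem.List.count lf c.2 : Nat) : Int) := by
    funext c
    rw [hcnt, PySem.Dict.getD_counter, PySem.List.count_eq]
  simp only [hk1]
  -- A's loop, with its filter rewritten to a filter on the full (count, face) key
  set k1 : Int × Int → Int := fun c => ((PySem.List.count lf c.2 : Nat) : Int) with hk1d
  set fc : List (Int × Int) :=
    PySem.List.sorted2 ((PySem.Set.ofList lf).map (fun f => (((PySem.List.count lf f : Nat) : Int), f)))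
      (fun p => p.1) (fun p => p.2) false with hfc
  have hmemfc : ∀ f ∈ fc, ∃ g ∈ PySem.Set.ofList lf, f = (((PySem.List.count lf g : Nat) : Int), g) := by
    intro f hf
    rcases List.mem_map.mp ((mem_sorted2 _ _ _ _).mp hf) with ⟨g, hg, heq⟩
    exact ⟨g, hg, heq.symm⟩
  have hfilter : ∀ f ∈ fc, (h.filter (fun c => c.2 == f.2))
      = h.filter (fun c => (k1 c, c.2) == f) := by
    intro f hf
    rcases hmemfc f hf with ⟨g, _, rfl⟩
    apply List.filter_congr
    intro c _
    by_cases hcg : c.2 = g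
    · simp [hk1d, hcg]
    · simp [hcg]
  have hA : fc.foldl (fun sh f => sh ++ h.filter (fun c => c.2 == f.2)) []
      = fc.flatMap (fun f => h.filter (fun c => (k1 c, c.2) == f)) := by
    rw [PySem.List.foldl_congr_mem fc _
      (fun sh f => sh ++ h.filter (fun c => (k1 c, c.2) == f)) []
      (fun acc f hf => by rw [hfilter f hf])]
    exact PySem.List.foldl_append_eq_flatMap _ fc []
  rw [hA]
  -- fc is strictly increasing and enumerates exactly the keys occurring in h
  have hpairs_nodup : ((PySem.Set.ofList lf).map
      (fun f => (((PySem.List.count lf f : Nat) : Int), f))).Nodup := by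
    apply List.Nodup.map
    · intro a b hab
      exact (Prod.ext_iff.mp hab).2
    · exact PySem.Set.nodup_ofList lf
  have hfc_nodup : fc.Nodup :=
    ((PySem.List.sorted2_perm _ _ _ _).nodup_iff).mpr hpairs_nodup
  have hS : fc.Pairwise (fun a b => pvLtb a b = true) := by
    have h1 := sorted2_pairwise' (k1 := fun p : Int × Int => p.1) (k2 := fun p : Int × Int => p.2)
      ((PySem.Set.ofList lf).map (fun f => (((PySem.List.count lf f : Nat) : Int), f)))
    rw [← hfc] at h1
    have h2 := List.Pairwise.and h1 (List.nodup_iff_pairwise_ne.mp hfc_nodup)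
    apply h2.imp
    intro a b hab
    exact pvLtb_total (Ne.symm hab.2) hab.1
  have hmem : ∀ v : Int × Int, v ∈ fc ↔ ∃ c ∈ h, (k1 c, c.2) = v := by
    intro v
    rw [mem_sorted2, List.mem_map]
    constructor
    · rintro ⟨g, hg, rfl⟩
      rcases List.mem_map.mp ((PySem.Set.mem_ofList lf g).mp hg) with ⟨c, hc, rfl⟩
      exact ⟨c, hc, rfl⟩
    · rintro ⟨c, hc, rfl⟩
      exact ⟨c.2, (PySem.Set.mem_ofList lf c.2).mpr (List.mem_map.mpr ⟨c, hc, rfl⟩), rfl⟩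
  rw [sorted2_eq_groups k1 (fun c => c.2) fc h hS hmem]
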